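-- pv_equiv track=rewrite | github.com/ai-kmu/etc | algorithm/Basic_Class/문제풀이코드/01_Hash/위장_youngjun.py | solution
-- ===== SOURCE A (Python) =====
-- from itertools import combinations
--
-- def solution(clothes):
--     answer = 0
--     store = {c:0 for _, c in clothes}
--
--     for _, c in clothes:
--         store[c] += 1
--
--     clothes_len = list(store.values())
--
--     for i in range(len(clothes_len)):
--         if i == 0:
--             for j in range(len(clothes_len)):
--                 answer += clothes_len[j]
--         else:
--             combs = list(combinations(clothes_len,i+1))
--             for k in range(len(combs)):
--                 num = 1
--                 for l in range(i+1):
--                     num *= combs[k][l]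
--                 answer += num
--
--     return answer
-- ===== SOURCE B (Python) =====
-- def solution(clothes):
--     counts = {}
--     for _, c in clothes:
--         counts[c] = counts.get(c, 0) + 1
--     answer = 1
--     for v in counts.values():
--         answer *= v + 1
--     return answer - 1
-- ===== Notes on version B (the rewrite author's own statement) =====
-- stated objective: faster
-- what changed: Replaces the exponential enumeration of all nonempty combinations of category counts (summing the product of each combination) with the closed form: product of (count+1) over categories, minus 1.
import Mathlib
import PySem

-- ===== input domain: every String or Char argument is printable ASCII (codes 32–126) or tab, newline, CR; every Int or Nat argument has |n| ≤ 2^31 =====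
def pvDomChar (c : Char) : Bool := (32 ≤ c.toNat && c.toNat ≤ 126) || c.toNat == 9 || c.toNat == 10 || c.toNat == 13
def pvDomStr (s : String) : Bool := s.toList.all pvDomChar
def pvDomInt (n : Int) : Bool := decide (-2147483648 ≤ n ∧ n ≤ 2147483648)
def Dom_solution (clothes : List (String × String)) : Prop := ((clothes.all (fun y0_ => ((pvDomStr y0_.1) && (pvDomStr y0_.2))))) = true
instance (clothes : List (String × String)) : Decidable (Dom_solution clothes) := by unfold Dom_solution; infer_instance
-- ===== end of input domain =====

-- B replaces A's enumeration of all combinations of category counts by the closed form ∏(count+1) − 1.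

-- ===== PORT A =====
-- itertools.combinations(xs, k), in the same (lexicographic-by-index) order
def pvCombos : Nat → List Int → List (List Int)
  | 0, _ => [[]]
  | _ + 1, [] => []
  | k + 1, x :: xs => (pvCombos k xs).map (x :: ·) ++ pvCombos (k + 1) xs

def solution (clothes : List (String × String)) : Int :=
  let store0 : PySem.Dict String Int :=
    clothes.foldl (fun d p => d.insert p.2 0) PySem.Dict.empty
  let store := clothes.foldl (fun d p => d.modify p.2 0 (· + 1)) store0
  let clothesLen := store.values
  (List.range clothesLen.length).foldl (fun answer i =>
    if i = 0 then
      clothesLen.foldl (fun a v => a + v) answer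
    else
      (pvCombos (i + 1) clothesLen).foldl
        (fun a comb => a + comb.foldl (fun num v => num * v) 1) answer) 0

-- ===== PORT B =====
def solution_alt (clothes : List (String × String)) : Int :=
  let counts : PySem.Dict String Int :=
    clothes.foldl (fun d p => d.insert p.2 (d.getD p.2 0 + 1)) PySem.Dict.empty
  counts.values.foldl (fun a v => a * (v + 1)) 1 - 1

-- ===== PRECONDITION & SPEC =====
def Spec_solution (clothes : List (String × String)) (out : Int) : Prop := out = solution_alt clothes
instance (clothes : List (String × String)) (out : Int) : Decidable (Spec_solution clothes out) := by unfold Spec_solution; infer_instance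

-- ===== CLAIM (what is proved, stated in full; the proofs are below) =====
def Claim_equal_solution : Prop := ∀ (clothes : List (String × String)), Dom_solution clothes → Spec_solution clothes (solution clothes)

-- ===== LEMMAS AND PROOFS =====

-- sum of products of all size-k combinations
def pvSP (L : List Int) (k : Nat) : Int := ((pvCombos k L).map (fun c => c.foldl (fun num v => num * v) 1)).sum

lemma foldl_mul_shift (c : List Int) (a : Int) :
    c.foldl (fun num v => num * v) a = a * c.foldl (fun num v => num * v) 1 := by
  induction c generalizing a with
  | nil => simp
  | cons x xs ih =>
    simp only [List.foldl_cons]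
    rw [ih (a * x), ih (1 * x)]
    ring

lemma foldl_add_shift (g : List Int → Int) (l : List (List Int)) (a : Int) :
    l.foldl (fun acc c => acc + g c) a = a + (l.map g).sum := by
  induction l generalizing a with
  | nil => simp
  | cons x xs ih => simp only [List.foldl_cons, List.map_cons, List.sum_cons]; rw [ih]; ring

lemma foldl_addv_shift (l : List Int) (a : Int) :
    l.foldl (fun acc v => acc + v) a = a + l.sum := by
  induction l generalizing a with
  | nil => simp
  | cons x xs ih => simp only [List.foldl_cons, List.sum_cons]; rw [ih]; ring

lemma foldl_mulp_shift (L : List Int) (a : Int) :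
    L.foldl (fun acc v => acc * (v + 1)) a = a * L.foldl (fun acc v => acc * (v + 1)) 1 := by
  induction L generalizing a with
  | nil => simp
  | cons x xs ih =>
    simp only [List.foldl_cons]
    rw [ih (a * (x + 1)), ih (1 * (x + 1))]
    ring

lemma pvSP_zero (L : List Int) : pvSP L 0 = 1 := by simp [pvSP, pvCombos]

lemma pvSP_succ (x : Int) (xs : List Int) (k : Nat) :
    pvSP (x :: xs) (k + 1) = x * pvSP xs k + pvSP xs (k + 1) := by
  simp only [pvSP, pvCombos, List.map_append, List.sum_append, List.map_map]
  congr 1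
  · induction pvCombos k xs with
    | nil => simp
    | cons c cs ih =>
      simp only [List.map_cons, List.sum_cons, Function.comp, ih]
      rw [List.foldl_cons, foldl_mul_shift]
      ring

lemma pvCombos_gt (L : List Int) : ∀ k, L.length < k → pvCombos k L = [] := by
  induction L with
  | nil => intro k hk; match k, hk with | n + 1, _ => rfl
  | cons x xs ih =>
    intro k hk
    match k, hk with
    | n + 1, hk =>
      simp only [List.length_cons] at hk
      simp [pvCombos, ih n (by omega), ih (n + 1) (by omega)]

lemma pvSP_gt (L : List Int) (k : Nat) (h : L.length < k) : pvSP L k = 0 := by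
  simp [pvSP, pvCombos_gt L k h]

lemma pvSP_one (L : List Int) : pvSP L 1 = L.sum := by
  induction L with
  | nil => simp [pvSP, pvCombos]
  | cons x xs ih => rw [pvSP_succ, pvSP_zero, ih, List.sum_cons]; ring

-- the closed form: 1 + Σ_{k=1..n} (sum of products of k-combinations) = ∏ (v+1)
lemma pv_key (L : List Int) :
    1 + ∑ i ∈ Finset.range L.length, pvSP L (i + 1)
      = L.foldl (fun acc v => acc * (v + 1)) 1 := by
  induction L with
  | nil => simp
  | cons x xs ih =>
    simp only [List.length_cons, List.foldl_cons]
    rw [foldl_mulp_shift]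
    have hs : ∀ i ∈ Finset.range (xs.length + 1), pvSP (x :: xs) (i + 1) = x * pvSP xs i + pvSP xs (i + 1) :=
      fun i _ => pvSP_succ x xs i
    rw [Finset.sum_congr rfl hs, Finset.sum_add_distrib, ← Finset.mul_sum]
    have h1 : ∑ i ∈ Finset.range (xs.length + 1), pvSP xs i
        = 1 + ∑ i ∈ Finset.range xs.length, pvSP xs (i + 1) := by
      rw [Finset.sum_range_succ']; rw [pvSP_zero]; ring
    have h2 : ∑ i ∈ Finset.range (xs.length + 1), pvSP xs (i + 1)
        = ∑ i ∈ Finset.range xs.length, pvSP xs (i + 1) := by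
      rw [Finset.sum_range_succ, pvSP_gt xs (xs.length + 1) (by omega)]; ring
    rw [h1, h2, ← ih]
    ring

-- A's outer loop computes Σ_{i<n} pvSP L (i+1)
lemma pv_loopA (L : List Int) :
    (List.range L.length).foldl (fun answer i =>
      if i = 0 then
        L.foldl (fun a v => a + v) answer
      else
        (pvCombos (i + 1) L).foldl
          (fun a comb => a + comb.foldl (fun num v => num * v) 1) answer) 0
      = ∑ i ∈ Finset.range L.length, pvSP L (i + 1) := by
  have step : ∀ (n : Nat),
      (List.range n).foldl (fun answer i =>
        if i = 0 then
          L.foldl (fun a v => a + v) answer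
        else
          (pvCombos (i + 1) L).foldl
            (fun a comb => a + comb.foldl (fun num v => num * v) 1) answer) 0
        = ∑ i ∈ Finset.range n, pvSP L (i + 1) := by
    intro n
    induction n with
    | zero => simp
    | succ m ih =>
      rw [List.range_succ, List.foldl_append, ih, List.foldl_cons, List.foldl_nil,
        Finset.sum_range_succ]
      by_cases hm : m = 0
      · subst hm
        simp [foldl_addv_shift, pvSP_one]
      · rw [if_neg hm, foldl_add_shift]
        rfl
  exact step L.length

-- A's store has getD 0 everywhere before the increments
lemma pv_getD_insert0 (l : List String) :
    ∀ (d : PySem.Dict String Int), (∀ w, d.getD w 0 = 0) →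
      ∀ v, (l.foldl (fun d x => d.insert x (0 : Int)) d).getD v 0 = 0 := by
  induction l with
  | nil => intro d hd v; simpa using hd v
  | cons x xs ih =>
    intro d hd v
    simp only [List.foldl_cons]
    refine ih _ (fun w => ?_) v
    rw [PySem.Dict.getD_insert]
    split <;> simp [hd]

-- Set.update s l = s when every element of l is already in s
lemma pv_update_self (l : List String) :
    PySem.Set.update (PySem.Set.ofList l) l = PySem.Set.ofList l := by
  rw [PySem.Set.update_eq_append_filter]
  have : (PySem.Set.ofList l).filter (fun y => !(PySem.Set.contains (PySem.Set.ofList l) y)) = [] := by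
    apply List.filter_eq_nil_iff.mpr
    intro y hy
    have hc : PySem.Set.contains (PySem.Set.ofList l) y = true := by
      rw [PySem.Set.contains_iff]; exact hy
    simp
    exact (PySem.Set.mem_ofList l y).mp hy
  rw [this, List.append_nil]

-- both dicts have values list (ofList l).map (count in l), l = category names
lemma pv_valuesA (clothes : List (String × String)) :
    (clothes.foldl (fun d p => d.modify p.2 0 (· + 1))
        (clothes.foldl (fun d p => d.insert p.2 (0 : Int)) PySem.Dict.empty)).values
      = (PySem.Set.ofList (clothes.map Prod.snd)).map
          (fun k => ((clothes.map Prod.snd).count k : Int)) := by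
  set l := clothes.map Prod.snd with hl
  set store0 := clothes.foldl (fun d p => d.insert p.2 (0 : Int)) PySem.Dict.empty with hs0
  set store := clothes.foldl (fun d p => d.modify p.2 0 (· + 1)) store0 with hs
  have hkeys0 : store0.keys = PySem.Set.ofList l := by
    rw [hs0, PySem.Dict.keys_foldl_insert_key (key := Prod.snd), PySem.Dict.keys_empty,
      PySem.Set.update_nil_left, ← hl]
  have hkeys : store.keys = PySem.Set.ofList l := by
    rw [hs, PySem.Dict.keys_foldl_modify_key (key := Prod.snd), hkeys0, ← hl, pv_update_self]
  have hnodup : store.keys.Nodup := by rw [hkeys]; exact PySem.Set.nodup_ofList _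
  have hgetD0 : ∀ v, store0.getD v 0 = 0 := by
    intro v
    rw [hs0, ← List.foldl_map (f := Prod.snd) (g := fun (d : PySem.Dict String Int) x => d.insert x (0 : Int)), ← hl]
    exact pv_getD_insert0 l PySem.Dict.empty (by simp [PySem.Dict.getD_empty]) v
  have hgetD : ∀ v, store.getD v 0 = (l.count v : Int) := by
    intro v
    rw [hs, ← List.foldl_map (f := Prod.snd) (g := fun (d : PySem.Dict String Int) x => d.modify x 0 (· + 1)), ← hl,
      PySem.Dict.getD_foldl_modify_add_one, hgetD0]
    ring
  rw [PySem.Dict.values_eq_map_keys store hnodup 0, hkeys]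
  exact List.map_congr_left (fun k _ => hgetD k)

lemma pv_valuesB (clothes : List (String × String)) :
    (clothes.foldl (fun d p => d.insert p.2 (d.getD p.2 0 + 1)) PySem.Dict.empty).values
      = (PySem.Set.ofList (clothes.map Prod.snd)).map
          (fun k => ((clothes.map Prod.snd).count k : Int)) := by
  rw [← List.foldl_map (f := Prod.snd) (g := fun (d : PySem.Dict String Int) x => d.insert x (d.getD x 0 + 1)),
    PySem.Dict.foldl_insert_getD_add_one_eq_counter]
  simp only [PySem.Dict.values, PySem.Dict.items_counter, List.map_map]
  rfl

-- ===== VERDICT (by name: the statement is the Claim_ definition above) =====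
theorem solution_spec : Claim_equal_solution := by
  intro clothes _
  simp only [Spec_solution, solution, solution_alt]
  rw [pv_valuesA, pv_valuesB]
  set L := (PySem.Set.ofList (clothes.map Prod.snd)).map
    (fun k => ((clothes.map Prod.snd).count k : Int))
  rw [pv_loopA, ← pv_key L]
  ring
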